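-- pv_equiv track=rewrite | github.com/abdoabozena7/AgenticAI_Community_simulator-DEPI | backend/app/agents/persona_agent.py | _signals_are_traceable
-- ===== SOURCE A (Python) =====
-- from typing import Any, Dict, List, Optional, Sequence, Tuple
--
-- def _signals_are_traceable(evidence_signals: Sequence[str], approved_signals: set[str]) -> bool:
--     if not evidence_signals:
--         return False
--     for value in evidence_signals:
--         text = str(value or "").strip().lower()
--         if text and text in approved_signals:
--             return True
--     return False
-- ===== SOURCE B (Python) =====
-- def _signals_are_traceable(evidence_signals, approved_signals):
--     ev = sorted({str(v or "").strip().lower() for v in evidence_signals} - {""})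
--     ap = sorted(approved_signals)
--     i = j = 0
--     while i < len(ev) and j < len(ap):
--         if ev[i] == ap[j]:
--             return True
--         if ev[i] < ap[j]:
--             i += 1
--         else:
--             j += 1
--     return False
-- ===== Notes on version B (the rewrite author's own statement) =====
-- stated objective: alternative
-- what changed: Replaces the element-wise early-exit hash-membership loop with sorting the deduplicated normalized evidence and the approved set and running a two-pointer merge scan to detect a common element.
import Mathlib
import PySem

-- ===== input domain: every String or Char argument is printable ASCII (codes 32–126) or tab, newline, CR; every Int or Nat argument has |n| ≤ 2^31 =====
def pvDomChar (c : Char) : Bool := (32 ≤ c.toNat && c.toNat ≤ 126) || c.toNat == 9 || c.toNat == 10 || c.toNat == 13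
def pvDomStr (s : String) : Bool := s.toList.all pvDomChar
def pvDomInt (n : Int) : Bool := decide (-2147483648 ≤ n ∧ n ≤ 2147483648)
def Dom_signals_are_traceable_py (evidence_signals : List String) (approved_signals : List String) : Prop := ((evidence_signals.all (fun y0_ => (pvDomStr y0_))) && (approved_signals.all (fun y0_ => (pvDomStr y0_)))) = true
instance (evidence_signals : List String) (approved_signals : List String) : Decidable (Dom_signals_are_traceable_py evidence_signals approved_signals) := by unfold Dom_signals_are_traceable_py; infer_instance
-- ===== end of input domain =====

-- B replaces A's element-wise early-exit membership loop by sorting the deduplicated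
-- normalized evidence and the approved set and detecting a common element with a
-- two-pointer merge scan (alternative algorithm, similar cost).

-- ===== PORT A =====
-- A's early-exit 'for value in evidence_signals: … return True' loop
-- (str(value or "") is 'value' itself, since value is a string: falsy strings are exactly "")
def pvALoop (approved_signals : List String) : List String → Bool
  | [] => false
  | value :: rest =>
      let text := PySem.Str.lower (PySem.Str.strip value)
      if !(text == "") && PySem.Set.contains approved_signals text then true
      else pvALoop approved_signals rest

def signals_are_traceable_py (evidence_signals : List String) (approved_signals : List String) : Bool :=
  if evidence_signals.isEmpty then false
  else pvALoop approved_signals evidence_signals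

-- ===== PORT B =====
-- Source B's two-pointer while loop: advance in whichever sorted list has the smaller head
def pvMergeScan : List String → List String → Bool
  | [], _ => false
  | _, [] => false
  | x :: xs, y :: ys =>
      if x = y then true
      else if x < y then pvMergeScan xs (y :: ys)
      else pvMergeScan (x :: xs) ys
  termination_by xs ys => xs.length + ys.length

def signals_are_traceable_py_alt (evidence_signals : List String) (approved_signals : List String) : Bool :=
  let ev := PySem.List.sorted
      (PySem.Set.diff
        (PySem.Set.ofList (evidence_signals.map (fun v => PySem.Str.lower (PySem.Str.strip v))))
        [""])
      (fun x => x) false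
  let ap := PySem.List.sorted approved_signals (fun x => x) false
  pvMergeScan ev ap

-- ===== PRECONDITION & SPEC =====
def Spec_signals_are_traceable_py (evidence_signals : List String) (approved_signals : List String) (out : Bool) : Prop := out = signals_are_traceable_py_alt evidence_signals approved_signals
instance (evidence_signals : List String) (approved_signals : List String) (out : Bool) : Decidable (Spec_signals_are_traceable_py evidence_signals approved_signals out) := by unfold Spec_signals_are_traceable_py; infer_instance

-- ===== CLAIM (what is proved, stated in full; the proofs are below) =====
def Claim_equal_signals_are_traceable_py : Prop := ∀ (evidence_signals : List String) (approved_signals : List String), Dom_signals_are_traceable_py evidence_signals approved_signals → Spec_signals_are_traceable_py evidence_signals approved_signals (signals_are_traceable_py evidence_signals approved_signals)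

-- ===== LEMMAS AND PROOFS =====

-- A's early-exit loop is an existential scan over the evidence list
theorem pvALoop_eq_any (approved : List String) (es : List String) :
    pvALoop approved es =
      es.any (fun v => !(PySem.Str.lower (PySem.Str.strip v) == "") &&
                        PySem.Set.contains approved (PySem.Str.lower (PySem.Str.strip v))) := by
  induction es with
  | nil => rfl
  | cons v rest ih =>
      rw [List.any_cons, ← ih]
      show (if (!(PySem.Str.lower (PySem.Str.strip v) == "") &&
          PySem.Set.contains approved (PySem.Str.lower (PySem.Str.strip v))) = true then true
        else pvALoop approved rest) = _
      cases hc : (!(PySem.Str.lower (PySem.Str.strip v) == "") &&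
          PySem.Set.contains approved (PySem.Str.lower (PySem.Str.strip v))) <;> simp

-- the merge scan over two ≤-sorted lists detects exactly a common element
theorem pvMergeScan_iff (xs ys : List String)
    (hx : xs.Pairwise (· ≤ ·)) (hy : ys.Pairwise (· ≤ ·)) :
    pvMergeScan xs ys = true ↔ ∃ z, z ∈ xs ∧ z ∈ ys := by
  revert hx hy
  induction xs, ys using pvMergeScan.induct with
  | case1 ys => intro _ _; simp [pvMergeScan]
  | case2 xs _ => intro _ _; simp [pvMergeScan]
  | case3 xs y ys =>
      intro _ _
      simp only [pvMergeScan]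
      exact ⟨fun _ => ⟨y, by simp⟩, fun _ => rfl⟩
  | case4 x xs y ys hne hlt ih =>
      intro hx hy
      have hx' := (List.pairwise_cons.mp hx).2
      have ihr := ih hx' hy
      have hxnot : x ∉ y :: ys := by
        intro hmem
        rcases List.mem_cons.mp hmem with h | h
        · exact hne h
        · have := (List.pairwise_cons.mp hy).1 x h
          exact absurd (lt_of_lt_of_le hlt this) (lt_irrefl x)
      rw [show pvMergeScan (x :: xs) (y :: ys) = pvMergeScan xs (y :: ys) by
        simp [pvMergeScan, hne, hlt]]
      rw [ihr]
      constructor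
      · rintro ⟨z, hz1, hz2⟩; exact ⟨z, List.mem_cons_of_mem _ hz1, hz2⟩
      · rintro ⟨z, hz1, hz2⟩
        rcases List.mem_cons.mp hz1 with rfl | h
        · exact absurd hz2 hxnot
        · exact ⟨z, h, hz2⟩
  | case5 x xs y ys hne hnlt ih =>
      intro hx hy
      have hy' := (List.pairwise_cons.mp hy).2
      have ihr := ih hx hy'
      have hylt : y < x := lt_of_le_of_ne (not_lt.mp hnlt) (fun h => hne h.symm)
      have hynot : y ∉ x :: xs := by
        intro hmem
        rcases List.mem_cons.mp hmem with h | h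
        · exact hne h.symm
        · have := (List.pairwise_cons.mp hx).1 y h
          exact absurd (lt_of_lt_of_le hylt this) (lt_irrefl y)
      rw [show pvMergeScan (x :: xs) (y :: ys) = pvMergeScan (x :: xs) ys by
        simp [pvMergeScan, hne, hnlt]]
      rw [ihr]
      constructor
      · rintro ⟨z, hz1, hz2⟩; exact ⟨z, hz1, List.mem_cons_of_mem _ hz2⟩
      · rintro ⟨z, hz1, hz2⟩
        rcases List.mem_cons.mp hz2 with rfl | h
        · exact absurd hz1 hynot
        · exact ⟨z, hz1, h⟩

-- B's sort-and-merge is the same existential as A's scan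
theorem alt_eq_any (es approved : List String) :
    signals_are_traceable_py_alt es approved =
      es.any (fun v => !(PySem.Str.lower (PySem.Str.strip v) == "") &&
                        PySem.Set.contains approved (PySem.Str.lower (PySem.Str.strip v))) := by
  unfold signals_are_traceable_py_alt
  rw [Bool.eq_iff_iff]
  rw [pvMergeScan_iff _ _ (PySem.List.sorted_pairwise _ _) (PySem.List.sorted_pairwise _ _)]
  simp only [PySem.List.mem_sorted, PySem.Set.mem_diff, PySem.Set.mem_ofList, List.mem_map,
    List.mem_singleton, List.any_eq_true, Bool.and_eq_true, Bool.not_eq_true',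
    beq_eq_false_iff_ne, ne_eq, PySem.Set.contains_iff]
  constructor
  · rintro ⟨z, ⟨⟨v, hv, rfl⟩, hne⟩, hm⟩
    exact ⟨v, hv, hne, hm⟩
  · rintro ⟨v, hv, hne, hm⟩
    exact ⟨PySem.Str.lower (PySem.Str.strip v), ⟨⟨v, hv, rfl⟩, hne⟩, hm⟩

-- ===== VERDICT (by name: the statement is the Claim_ definition above) =====
theorem signals_are_traceable_py_spec : Claim_equal_signals_are_traceable_py := by
  intro es approved _
  unfold Spec_signals_are_traceable_py signals_are_traceable_py
  rw [alt_eq_any, ← pvALoop_eq_any]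
  cases es with
  | nil => simp [pvALoop]
  | cons v rest => simp
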